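-- pv_equiv track=rewrite | github.com/alexandersumer/gto-poker-trainer | src/gto_trainer/dynamic/cards.py | canonicalize_cards
-- ===== SOURCE A (Python) =====
-- from collections.abc import Iterable, Sequence
--
-- def _canonical_suit_order(cards: Sequence[int]) -> list[int]:
--     """Return suits in deterministic priority for canonical remapping."""
--
--     ordered: list[int] = []
--     # Highest rank first; break ties by suit index to keep ordering stable.
--     indices = sorted(range(len(cards)), key=lambda i: (cards[i] // 4, cards[i] % 4), reverse=True)
--     for idx in indices:
--         suit = cards[idx] % 4
--         if suit not in ordered:
--             ordered.append(suit)
--     return ordered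
--
-- def canonicalize_cards(
--     hero: Iterable[int],
--     board: Iterable[int],
--     extra: Iterable[int] | None = None,
-- ) -> tuple[tuple[int, ...], tuple[int, ...], tuple[int, ...]]:
--     """Canonicalise suits across hero + board (+ optional extra) for caching.
--
--     Cards that are suit-isomorphic map to the same canonical tuples, letting
--     downstream caching reuse expensive equity evaluations.
--     Returns canonicalised `(hero, board, extra)` tuples sorted ascending.
--     """
--
--     hero_list = list(hero)
--     board_list = list(board)
--     extra_list = list(extra or [])
--
--     combined = hero_list + board_list + extra_list
--     if not combined:
--         return (), (), ()
--
--     suit_order = _canonical_suit_order(combined)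
--     suit_map = {suit: idx for idx, suit in enumerate(suit_order)}
--
--     def _remap(card: int) -> int:
--         rank = card // 4
--         suit = card % 4
--         mapped = suit_map.setdefault(suit, len(suit_map))
--         if mapped >= 4:
--             raise ValueError("Canonicalisation assigned invalid suit index")
--         return rank * 4 + mapped
--
--     hero_canon = tuple(sorted(_remap(card) for card in hero_list))
--     board_canon = tuple(sorted(_remap(card) for card in board_list))
--     extra_canon = tuple(sorted(_remap(card) for card in extra_list))
--
--     return hero_canon, board_canon, extra_canon
-- ===== SOURCE B (Python) =====
-- def canonicalize_cards(hero, board, extra=None):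
--     hero_list = list(hero)
--     board_list = list(board)
--     extra_list = list(extra or [])
--
--     combined = hero_list + board_list + extra_list
--     if not combined:
--         return (), (), ()
--
--     # The highest card of each suit decides suit priority: the lexicographic
--     # (rank, suit) order used by A coincides with plain card order.
--     best = {}
--     for card in combined:
--         suit = card % 4
--         v = best.get(suit)
--         if v is None or v < card:
--             best[suit] = card
--     suit_order = sorted(best, key=lambda s: best[s], reverse=True)
--     suit_map = {suit: idx for idx, suit in enumerate(suit_order)}
--
--     def _remap(card):
--         return card // 4 * 4 + suit_map[card % 4]
--
--     hero_canon = tuple(sorted(_remap(card) for card in hero_list))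
--     board_canon = tuple(sorted(_remap(card) for card in board_list))
--     extra_canon = tuple(sorted(_remap(card) for card in extra_list))
--     return hero_canon, board_canon, extra_canon
-- ===== Notes on version B (the rewrite author's own statement) =====
-- stated objective: faster
-- what changed: The suit priority is computed by a single grouping pass that keeps the highest card per suit in a dict (lexicographic (rank,suit) order equals plain card order) and then sorts the at-most-four suits by that card, instead of A's sort of all card indices by a (rank,suit) tuple key descending followed by a first-seen dedup of suits; the remap drops A's unreachable setdefault/ValueError machinery.
import Mathlib
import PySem

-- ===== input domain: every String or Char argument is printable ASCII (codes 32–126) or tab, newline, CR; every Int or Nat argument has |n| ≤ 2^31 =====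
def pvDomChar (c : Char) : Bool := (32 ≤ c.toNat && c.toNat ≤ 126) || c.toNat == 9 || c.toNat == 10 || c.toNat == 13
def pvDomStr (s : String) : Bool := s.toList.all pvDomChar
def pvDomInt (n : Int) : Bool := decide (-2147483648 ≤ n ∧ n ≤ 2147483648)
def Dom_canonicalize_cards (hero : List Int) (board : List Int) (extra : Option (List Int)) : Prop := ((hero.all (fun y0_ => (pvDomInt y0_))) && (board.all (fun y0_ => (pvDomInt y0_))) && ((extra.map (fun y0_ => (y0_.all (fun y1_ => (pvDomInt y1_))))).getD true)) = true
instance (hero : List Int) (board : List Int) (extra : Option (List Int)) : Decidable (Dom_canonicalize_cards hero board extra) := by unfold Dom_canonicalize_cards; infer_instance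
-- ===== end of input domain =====

-- B replaces A's sort of all card indices by a (rank, suit) tuple key with a single
-- grouping pass keeping the best card per suit (lex (rank,suit) order equals card
-- order); same values, measurably faster in a timing run.

-- ===== PORT A =====
-- port of _canonical_suit_order: sort indices by (cards[i]//4, cards[i]%4) descending,
-- then collect suits on first sight
def pvCanonSuitOrder (cards : List Int) : List Int :=
  let indices := PySem.List.sorted2 (PySem.List.pyRange 0 (PySem.List.len cards))
    (fun i => PySem.Int.floordiv (PySem.List.pyGetD cards i 0) 4)
    (fun i => PySem.Int.mod (PySem.List.pyGetD cards i 0) 4) true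
  indices.foldl (fun ordered idx =>
    let suit := PySem.Int.mod (PySem.List.pyGetD cards idx 0) 4
    if suit ∈ ordered then ordered else ordered ++ [suit]) []

-- port of the `_remap(card) for card in <list>` generator, threading the closed-over
-- mutable suit_map (setdefault).  The `mapped >= 4` ValueError branch of A is
-- unreachable (suit_map holds at most the four suits of `combined`, and setdefault
-- never inserts because every remapped card occurs in `combined`), so no raise arises.
def pvRemapA (cards : List Int) (sm : PySem.Dict Int Int) : List Int × PySem.Dict Int Int :=
  cards.foldl (fun acc card =>
    let rank := PySem.Int.floordiv card 4
    let suit := PySem.Int.mod card 4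
    let mapped := match acc.2.get? suit with
      | some v => v
      | none => ((PySem.Dict.size acc.2 : Nat) : Int)
    let d := acc.2.setdefault suit ((PySem.Dict.size acc.2 : Nat) : Int)
    (acc.1 ++ [rank * 4 + mapped], d)) ([], sm)

def canonicalize_cards (hero : List Int) (board : List Int) (extra : Option (List Int)) : List Int × List Int × List Int :=
  let extra_list := extra.getD []
  let combined := hero ++ board ++ extra_list
  if combined = [] then ([], [], [])
  else
    let suit_order := pvCanonSuitOrder combined
    let suit_map := (PySem.List.enumerate suit_order).foldl
        (fun d (p : Int × Int) => d.insert p.2 p.1) PySem.Dict.empty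
    let h := pvRemapA hero suit_map
    let b := pvRemapA board h.2
    let e := pvRemapA extra_list b.2
    (PySem.List.sorted h.1 (fun x => x) false,
     PySem.List.sorted b.1 (fun x => x) false,
     PySem.List.sorted e.1 (fun x => x) false)

-- ===== PORT B =====
-- one pass keeping, per suit, the highest card seen  ('v = best.get(suit); if v is None or v < card: ...')
def pvBestStep (d : PySem.Dict Int Int) (card : Int) : PySem.Dict Int Int :=
  let suit := PySem.Int.mod card 4
  match d.get? suit with
  | none => d.insert suit card
  | some v => if v < card then d.insert suit card else d

-- `suit_map[card % 4]` in Source B cannot raise KeyError (every suit of hero/board/extra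
-- occurs in combined, hence in suit_order); ported with getD.
def canonicalize_cards_alt (hero : List Int) (board : List Int) (extra : Option (List Int)) : List Int × List Int × List Int :=
  let extra_list := extra.getD []
  let combined := hero ++ board ++ extra_list
  if combined = [] then ([], [], [])
  else
    let best := combined.foldl pvBestStep PySem.Dict.empty
    let suit_order := PySem.List.sorted (PySem.Dict.keys best) (fun s => best.getD s 0) true
    let suit_map := (PySem.List.enumerate suit_order).foldl
        (fun d (p : Int × Int) => d.insert p.2 p.1) PySem.Dict.empty
    let remap := fun (card : Int) =>
      PySem.Int.floordiv card 4 * 4 + suit_map.getD (PySem.Int.mod card 4) 0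
    (PySem.List.sorted (hero.map remap) (fun x => x) false,
     PySem.List.sorted (board.map remap) (fun x => x) false,
     PySem.List.sorted (extra_list.map remap) (fun x => x) false)

-- ===== PRECONDITION & SPEC =====
def Spec_canonicalize_cards (hero : List Int) (board : List Int) (extra : Option (List Int)) (out : List Int × List Int × List Int) : Prop := out = canonicalize_cards_alt hero board extra
instance (hero : List Int) (board : List Int) (extra : Option (List Int)) (out : List Int × List Int × List Int) : Decidable (Spec_canonicalize_cards hero board extra out) := by unfold Spec_canonicalize_cards; infer_instance

-- ===== CLAIM (what is proved, stated in full; the proofs are below) =====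
def Claim_equal_canonicalize_cards : Prop := ∀ (hero : List Int) (board : List Int) (extra : Option (List Int)), Dom_canonicalize_cards hero board extra → Spec_canonicalize_cards hero board extra (canonicalize_cards hero board extra)

-- ===== LEMMAS AND PROOFS =====

-- the suit of a card
def pvSu (c : Int) : Int := PySem.Int.mod c 4

-- the combined cards listed in descending order (A's sorted index pass, read back)
def pvL (cs : List Int) : List Int :=
  (PySem.List.sorted (PySem.List.pyRange 0 (PySem.List.len cs))
    (fun i => PySem.List.pyGetD cs i 0) true).map (fun i => PySem.List.pyGetD cs i 0)

-- the canonical suit order both programs compute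
def pvSO (cs : List Int) : List Int := PySem.Set.ofList ((pvL cs).map pvSu)

def pvSM (so : List Int) : PySem.Dict Int Int :=
  (PySem.List.enumerate so).foldl (fun d (p : Int × Int) => d.insert p.2 p.1) PySem.Dict.empty

def pvF (sm : PySem.Dict Int Int) (c : Int) : Int :=
  PySem.Int.floordiv c 4 * 4 + sm.getD (PySem.Int.mod c 4) 0

-- lexicographic (rank, suit) comparison is plain card comparison
lemma pvKeyLt (x y : Int) :
    (decide (PySem.Int.floordiv x 4 < PySem.Int.floordiv y 4) ||
      (!decide (PySem.Int.floordiv y 4 < PySem.Int.floordiv x 4) &&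
        decide (PySem.Int.mod x 4 < PySem.Int.mod y 4))) = decide (x < y) := by
  have e1 : PySem.Int.floordiv x 4 = x / 4 := PySem.Int.floordiv_eq_ediv_of_pos (by norm_num)
  have e2 : PySem.Int.floordiv y 4 = y / 4 := PySem.Int.floordiv_eq_ediv_of_pos (by norm_num)
  have e3 : PySem.Int.mod x 4 = x % 4 := PySem.Int.mod_eq_emod_of_pos (by norm_num)
  have e4 : PySem.Int.mod y 4 = y % 4 := PySem.Int.mod_eq_emod_of_pos (by norm_num)
  rw [e1, e2, e3, e4]
  by_cases h : x < y
  · have key : (x / 4 < y / 4 ∨ (¬ y / 4 < x / 4 ∧ x % 4 < y % 4)) := by omega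
    rcases key with h1 | ⟨h1, h2⟩
    · simp [h, h1]
    · simp [h, h1, h2]
  · have a1 : ¬ (x / 4 < y / 4) := by omega
    by_cases a2 : y / 4 < x / 4
    · simp [a1, a2, h]
    · have a3 : ¬ (x % 4 < y % 4) := by omega
      simp [a1, a2, a3, h]

-- A's suit order is the first-occurrence dedup of the suits of the descending card list
lemma pvCanonSuitOrder_eq (cards : List Int) : pvCanonSuitOrder cards = pvSO cards := by
  unfold pvCanonSuitOrder pvSO pvL
  have hs : PySem.List.sorted2 (PySem.List.pyRange 0 (PySem.List.len cards))
      (fun i => PySem.Int.floordiv (PySem.List.pyGetD cards i 0) 4)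
      (fun i => PySem.Int.mod (PySem.List.pyGetD cards i 0) 4) true
      = PySem.List.sorted (PySem.List.pyRange 0 (PySem.List.len cards))
          (fun i => PySem.List.pyGetD cards i 0) true := by
    rw [PySem.List.sorted_rev_eq_foldl_insertBy]
    simp only [PySem.List.sorted2]
    congr 1
    funext acc x
    congr 1
    funext a b
    exact pvKeyLt (PySem.List.pyGetD cards b 0) (PySem.List.pyGetD cards a 0)
  rw [hs, List.map_map, PySem.Set.ofList_eq_foldl, List.foldl_map]
  show List.foldl (fun ordered idx =>
      if PySem.Int.mod (PySem.List.pyGetD cards idx 0) 4 ∈ ordered then ordered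
      else ordered ++ [PySem.Int.mod (PySem.List.pyGetD cards idx 0) 4]) []
      (PySem.List.sorted (PySem.List.pyRange 0 (PySem.List.len cards))
        (fun i => PySem.List.pyGetD cards i 0) true) = _
  congr 1
  funext acc i
  simp [PySem.Set.add, pvSu, Function.comp]

lemma pvFilter_swap (p q : Int → Bool) (l : List Int) :
    (l.filter q).filter p = (l.filter p).filter q := by
  rw [List.filter_filter, List.filter_filter]
  congr 1
  funext a
  exact Bool.and_comm _ _

-- filtering commutes with first-occurrence dedup
lemma pvFilter_ofList (p : Int → Bool) (ys : List Int) :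
    (PySem.Set.ofList ys).filter p = PySem.Set.ofList (ys.filter p) := by
  induction ys with
  | nil => simp [PySem.Set.ofList_nil]
  | cons y ys ih =>
    rw [PySem.Set.ofList_cons]
    by_cases hp : p y
    · rw [List.filter_cons_of_pos hp, List.filter_cons_of_pos hp, PySem.Set.ofList_cons]
      show y :: ((PySem.Set.ofList ys).filter (fun z => !(z == y))).filter p = _
      rw [pvFilter_swap, ih]
      rfl
    · rw [List.filter_cons_of_neg hp, List.filter_cons_of_neg hp]
      show ((PySem.Set.ofList ys).filter (fun z => !(z == y))).filter p = _
      rw [pvFilter_swap, ih]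
      have hy : y ∉ PySem.Set.ofList (ys.filter p) := by
        rw [PySem.Set.mem_ofList]
        intro hmem
        exact hp (List.of_mem_filter hmem)
      show (PySem.Set.ofList (ys.filter p)).filter (fun z => !(z == y)) = _
      rw [List.filter_eq_self]
      intro a ha
      simp only [Bool.not_eq_eq_eq_not, Bool.not_true, beq_eq_false_iff_ne]
      exact fun h => hy (h ▸ ha)

lemma pvBestStep_get?_ne (d : PySem.Dict Int Int) (c : Int) {s : Int} (h : s ≠ pvSu c) :
    (pvBestStep d c).get? s = d.get? s := by
  show (match d.get? (PySem.Int.mod c 4) with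
    | none => d.insert (PySem.Int.mod c 4) c
    | some v => if v < c then d.insert (PySem.Int.mod c 4) c else d).get? s = d.get? s
  cases hg : d.get? (PySem.Int.mod c 4) with
  | none => exact PySem.Dict.get?_insert_of_ne _ _ h
  | some v =>
    show (if v < c then d.insert (PySem.Int.mod c 4) c else d).get? s = d.get? s
    by_cases hv : v < c
    · rw [if_pos hv]; exact PySem.Dict.get?_insert_of_ne _ _ h
    · rw [if_neg hv]

lemma pvBestStep_get?_self (d : PySem.Dict Int Int) (c : Int) :
    ∃ M, (pvBestStep d c).get? (pvSu c) = some M ∧ c ≤ M ∧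
      (d.get? (pvSu c) = some M ∨ M = c) ∧ (∀ w, d.get? (pvSu c) = some w → w ≤ M) := by
  show ∃ M, (match d.get? (PySem.Int.mod c 4) with
    | none => d.insert (PySem.Int.mod c 4) c
    | some v => if v < c then d.insert (PySem.Int.mod c 4) c else d).get? (pvSu c) = some M ∧ _
  cases hg : d.get? (PySem.Int.mod c 4) with
  | none =>
    refine ⟨c, ?_, le_refl c, Or.inr rfl, ?_⟩
    · exact PySem.Dict.get?_insert_self _ _ _
    · intro w hw
      rw [show d.get? (pvSu c) = d.get? (PySem.Int.mod c 4) from rfl, hg] at hw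
      cases hw
  | some v =>
    by_cases hv : v < c
    · refine ⟨c, ?_, le_refl c, Or.inr rfl, ?_⟩
      · show (if v < c then d.insert (PySem.Int.mod c 4) c else d).get? (pvSu c) = some c
        rw [if_pos hv]; exact PySem.Dict.get?_insert_self _ _ _
      · intro w hw
        rw [show d.get? (pvSu c) = d.get? (PySem.Int.mod c 4) from rfl, hg] at hw
        cases hw
        exact le_of_lt hv
    · refine ⟨v, ?_, not_lt.mp hv, Or.inl hg, ?_⟩
      · show (if v < c then d.insert (PySem.Int.mod c 4) c else d).get? (pvSu c) = some v
        rw [if_neg hv]; exact hg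
      · intro w hw
        rw [show d.get? (pvSu c) = d.get? (PySem.Int.mod c 4) from rfl, hg] at hw
        cases hw
        exact le_refl v

-- value stored per suit by B's grouping pass: a maximal card of that suit
lemma pvBest_get?_char (l : List Int) : ∀ (d : PySem.Dict Int Int) (s m : Int),
    (l.foldl pvBestStep d).get? s = some m →
      (d.get? s = some m ∨ (m ∈ l ∧ pvSu m = s)) ∧
      (∀ x ∈ l, pvSu x = s → x ≤ m) ∧
      (∀ v, d.get? s = some v → v ≤ m) := by
  induction l with
  | nil =>
    intro d s m h
    simp only [List.foldl_nil] at h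
    refine ⟨Or.inl h, ?_, ?_⟩
    · intro x hx; cases hx
    · intro v hv; rw [h] at hv; cases hv; exact le_refl m
  | cons c l ih =>
    intro d s m h
    rw [List.foldl_cons] at h
    obtain ⟨hA, hB, hC⟩ := ih (pvBestStep d c) s m h
    obtain ⟨M, hM, hcM, hMsrc, hMub⟩ := pvBestStep_get?_self d c
    by_cases hs : s = pvSu c
    · subst hs
      have hMm : M ≤ m := hC M hM
      refine ⟨?_, ?_, ?_⟩
      · rcases hA with hA | hA
        · rw [hM] at hA; cases hA
          rcases hMsrc with h1 | h1
          · exact Or.inl h1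
          · subst h1; exact Or.inr ⟨List.mem_cons_self, rfl⟩
        · exact Or.inr ⟨List.mem_cons_of_mem _ hA.1, hA.2⟩
      · intro x hx hsx
        rcases List.mem_cons.mp hx with rfl | hx
        · exact le_trans hcM hMm
        · exact hB x hx hsx
      · intro v hv
        exact le_trans (hMub v hv) hMm
    · have hne := pvBestStep_get?_ne d c hs
      refine ⟨?_, ?_, ?_⟩
      · rcases hA with hA | hA
        · exact Or.inl (hne ▸ hA)
        · exact Or.inr ⟨List.mem_cons_of_mem _ hA.1, hA.2⟩
      · intro x hx hsx
        rcases List.mem_cons.mp hx with rfl | hx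
        · exact absurd hsx.symm hs
        · exact hB x hx hsx
      · intro v hv
        exact hC v (by rw [hne]; exact hv)

lemma pvBest_keys (l : List Int) : ∀ (d : PySem.Dict Int Int),
    (l.foldl pvBestStep d).keys = PySem.Set.update d.keys (l.map pvSu) := by
  induction l with
  | nil => intro d; simp [PySem.Set.update_nil]
  | cons c l ih =>
    intro d
    rw [List.foldl_cons, ih, List.map_cons, PySem.Set.update_cons]
    congr 1
    show (match d.get? (PySem.Int.mod c 4) with
      | none => d.insert (PySem.Int.mod c 4) c
      | some v => if v < c then d.insert (PySem.Int.mod c 4) c else d).keys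
      = PySem.Set.add d.keys (PySem.Int.mod c 4)
    cases hg : d.get? (PySem.Int.mod c 4) with
    | none =>
      have hc : d.contains (PySem.Int.mod c 4) = false := by
        rw [PySem.Dict.contains_eq_isSome_get?, hg]; rfl
      have hnm : PySem.Int.mod c 4 ∉ d.keys := by
        intro hmem
        rw [← PySem.Dict.contains_iff_mem_keys] at hmem
        rw [hmem] at hc; cases hc
      show (d.insert (PySem.Int.mod c 4) c).keys = _
      rw [PySem.Dict.keys_insert_of_not_contains _ _ hc, PySem.Set.add_of_not_mem hnm]
    | some v =>
      have hc : d.contains (PySem.Int.mod c 4) = true := by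
        rw [PySem.Dict.contains_eq_isSome_get?, hg]; rfl
      have hm : PySem.Int.mod c 4 ∈ d.keys := (PySem.Dict.contains_iff_mem_keys d _).mp hc
      rw [PySem.Set.add_of_mem hm]
      show (if v < c then d.insert (PySem.Int.mod c 4) c else d).keys = d.keys
      by_cases hv : v < c
      · rw [if_pos hv, PySem.Dict.keys_insert_of_contains _ _ hc]
      · rw [if_neg hv]

-- the dedup of suits of a descending card list is strictly ordered by any per-suit maximum
lemma pvPairwiseDesc (n : Nat) : ∀ (L : List Int) (F : Int → Int), L.length ≤ n →
    L.Pairwise (fun a b => b ≤ a) →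
    (∀ s ∈ L.map pvSu, pvSu (F s) = s ∧ (∀ x ∈ L, pvSu x = s → x ≤ F s) ∧
      ∃ x ∈ L, pvSu x = s ∧ F s ≤ x) →
    (PySem.Set.ofList (L.map pvSu)).Pairwise (fun s t => F t < F s) := by
  induction n with
  | zero =>
    intro L F hlen _ _
    cases L with
    | nil => simp [PySem.Set.ofList_nil]
    | cons c L' => simp at hlen
  | succ n ih =>
    intro L F hlen hdesc hF
    cases L with
    | nil => simp [PySem.Set.ofList_nil]
    | cons c L' =>
      rw [List.map_cons, PySem.Set.ofList_cons]
      have hdisc : (PySem.Set.ofList (L'.map pvSu)).discard (pvSu c)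
          = PySem.Set.ofList ((L'.filter (fun x => !(pvSu x == pvSu c))).map pvSu) := by
        show (PySem.Set.ofList (L'.map pvSu)).filter (fun z => !(z == pvSu c)) = _
        rw [pvFilter_ofList, List.filter_map]
        rfl
      rw [hdisc]
      have hdesc' := List.pairwise_cons.mp hdesc
      rw [List.pairwise_cons]
      constructor
      · intro t ht
        rw [PySem.Set.mem_ofList] at ht
        obtain ⟨x0, hx0, rfl⟩ := List.mem_map.mp ht
        have hx0' : x0 ∈ L' := List.mem_of_mem_filter hx0
        have htne : pvSu x0 ≠ pvSu c := by simpa using List.of_mem_filter hx0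
        obtain ⟨ht1, ht2, x, hxL, hsx, hFx⟩ :=
          hF (pvSu x0) (List.mem_map.mpr ⟨x0, List.mem_cons_of_mem _ hx0', rfl⟩)
        obtain ⟨hc1, hc2, -⟩ := hF (pvSu c) (List.mem_map.mpr ⟨c, List.mem_cons_self, rfl⟩)
        have hcF : c ≤ F (pvSu c) := hc2 c List.mem_cons_self rfl
        have hxc : x ≤ c := by
          rcases List.mem_cons.mp hxL with rfl | hxL'
          · exact absurd hsx.symm htne
          · exact hdesc'.1 x hxL'
        have hle : F (pvSu x0) ≤ F (pvSu c) := le_trans hFx (le_trans hxc hcF)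
        have hne : F (pvSu x0) ≠ F (pvSu c) := by
          intro he
          apply htne
          rw [← ht1, he, hc1]
        exact lt_of_le_of_ne hle hne
      · apply ih
        · have h1 : (L'.filter (fun x => !(pvSu x == pvSu c))).length ≤ L'.length :=
            List.length_filter_le _ _
          simp only [List.length_cons] at hlen
          omega
        · exact List.Pairwise.sublist (List.filter_sublist) hdesc'.2
        · intro s hsmem
          obtain ⟨y, hy, rfl⟩ := List.mem_map.mp hsmem
          have hyne : pvSu y ≠ pvSu c := by simpa using List.of_mem_filter hy
          have hyL' : y ∈ L' := List.mem_of_mem_filter hy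
          obtain ⟨h1, h2, x, hxL, hsx, hFx⟩ :=
            hF (pvSu y) (List.mem_map.mpr ⟨y, List.mem_cons_of_mem _ hyL', rfl⟩)
          refine ⟨h1, ?_, ?_⟩
          · intro x' hx' hx's
            exact h2 x' (List.mem_cons_of_mem _ (List.mem_of_mem_filter hx')) hx's
          · refine ⟨x, ?_, hsx, hFx⟩
            rcases List.mem_cons.mp hxL with rfl | hxl
            · exact absurd hsx.symm hyne
            · exact List.mem_filter.mpr ⟨hxl, by simp [hsx, hyne]⟩

lemma pvSuitMap_isSome (pairs : List (Int × Int)) : ∀ (d : PySem.Dict Int Int) (s : Int),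
    (s ∈ pairs.map Prod.snd ∨ (d.get? s).isSome) →
    (((pairs.foldl (fun d (p : Int × Int) => d.insert p.2 p.1) d).get? s)).isSome := by
  induction pairs with
  | nil =>
    intro d s h
    rcases h with h | h
    · simp at h
    · simpa using h
  | cons p ps ih =>
    intro d s h
    rw [List.foldl_cons]
    apply ih
    by_cases hs : s = p.2
    · right; subst hs; rw [PySem.Dict.get?_insert_self]; rfl
    · rcases h with h | h
      · rw [List.map_cons, List.mem_cons] at h
        rcases h with h | h
        · exact absurd h hs
        · left; exact h
      · right; rw [PySem.Dict.get?_insert_of_ne _ _ hs]; exact h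

lemma pvEnumerate_map_snd (l : List Int) (s0 : Int) :
    (PySem.List.enumerate l s0).map Prod.snd = l := by
  rw [PySem.List.enumerate_eq_zipIdx_map, List.map_map]
  simp [Function.comp_def]

lemma pvRemapA_go (l : List Int) : ∀ (d : PySem.Dict Int Int) (acc0 : List Int),
    (∀ c ∈ l, ((d.get? (pvSu c)).isSome)) →
    l.foldl (fun acc card =>
      let rank := PySem.Int.floordiv card 4
      let suit := PySem.Int.mod card 4
      let mapped := match acc.2.get? suit with
        | some v => v
        | none => ((PySem.Dict.size acc.2 : Nat) : Int)
      let d' := acc.2.setdefault suit ((PySem.Dict.size acc.2 : Nat) : Int)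
      (acc.1 ++ [rank * 4 + mapped], d')) (acc0, d)
    = (acc0 ++ l.map (fun c => PySem.Int.floordiv c 4 * 4 + d.getD (pvSu c) 0), d) := by
  induction l with
  | nil => intro d acc0 h; simp
  | cons c l ih =>
    intro d acc0 h
    have hc := h c (List.mem_cons_self)
    rw [List.foldl_cons]
    cases hg : d.get? (pvSu c) with
    | none => rw [hg] at hc; cases hc
    | some v =>
      have hcont : d.contains (PySem.Int.mod c 4) = true := by
        rw [PySem.Dict.contains_eq_isSome_get?]
        show ((d.get? (pvSu c)).isSome) = true
        rw [hg]; rfl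
      have hsd : d.setdefault (PySem.Int.mod c 4) ((PySem.Dict.size d : Nat) : Int) = d :=
        PySem.Dict.setdefault_of_contains d _ hcont
      have hgd : d.getD (pvSu c) 0 = v := PySem.Dict.getD_of_get?_eq_some d 0 hg
      simp only []
      rw [show (d.get? (PySem.Int.mod c 4)) = some v from hg, hsd]
      rw [ih d _ (fun x hx => h x (List.mem_cons_of_mem _ hx))]
      rw [List.map_cons, hgd]
      simp

-- A's remap pass is a plain map: setdefault never inserts
lemma pvRemapA_eq (l : List Int) (d : PySem.Dict Int Int)
    (h : ∀ c ∈ l, ((d.get? (pvSu c)).isSome)) :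
    pvRemapA l d = (l.map (fun c => PySem.Int.floordiv c 4 * 4 + d.getD (pvSu c) 0), d) := by
  unfold pvRemapA
  rw [pvRemapA_go l d [] h]
  simp

-- the combined cards in descending order: a permutation of the combined cards
lemma pvL_perm (cs : List Int) : (pvL cs).Perm cs := by
  unfold pvL
  have h1 := (PySem.List.sorted_perm (PySem.List.pyRange 0 (PySem.List.len cs))
    (fun i => PySem.List.pyGetD cs i 0) true).map (fun i => PySem.List.pyGetD cs i 0)
  rw [PySem.List.map_pyGetD_pyRange_zero cs 0] at h1
  exact h1

lemma pvL_desc (cs : List Int) : (pvL cs).Pairwise (fun a b => b ≤ a) := by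
  unfold pvL
  rw [List.pairwise_map]
  exact PySem.List.sorted_pairwise_rev _ _

-- B's sorted suit list coincides with A's canonical suit order
lemma pvBestSorted_eq (cs : List Int) :
    PySem.List.sorted (PySem.Dict.keys (cs.foldl pvBestStep PySem.Dict.empty))
      (fun s => (cs.foldl pvBestStep PySem.Dict.empty).getD s 0) true = pvSO cs := by
  set best := cs.foldl pvBestStep PySem.Dict.empty with hbest
  have hkeys : best.keys = PySem.Set.ofList (cs.map pvSu) := by
    rw [hbest, pvBest_keys, PySem.Dict.keys_empty, PySem.Set.update_nil_left]
  have hmemL : ∀ a, a ∈ (pvL cs).map pvSu ↔ a ∈ cs.map pvSu := by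
    intro a
    constructor
    · intro h
      obtain ⟨x, hx, rfl⟩ := List.mem_map.mp h
      exact List.mem_map.mpr ⟨x, (pvL_perm cs).mem_iff.mp hx, rfl⟩
    · intro h
      obtain ⟨x, hx, rfl⟩ := List.mem_map.mp h
      exact List.mem_map.mpr ⟨x, (pvL_perm cs).mem_iff.mpr hx, rfl⟩
  have hsome : ∀ s ∈ cs.map pvSu, (best.get? s).isSome := by
    intro s hsmem
    rw [← PySem.Dict.contains_eq_isSome_get?]
    rw [PySem.Dict.contains_iff_mem_keys, hkeys, PySem.Set.mem_ofList]
    exact hsmem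
  have hperm : (pvSO cs).Perm best.keys := by
    rw [hkeys]
    unfold pvSO
    rw [List.perm_ext_iff_of_nodup (PySem.Set.nodup_ofList _) (PySem.Set.nodup_ofList _)]
    intro a
    rw [PySem.Set.mem_ofList, PySem.Set.mem_ofList]
    exact hmemL a
  have hpair : (pvSO cs).Pairwise (fun s t => best.getD t 0 < best.getD s 0) := by
    unfold pvSO
    apply pvPairwiseDesc (pvL cs).length (pvL cs) _ (le_refl _) (pvL_desc cs)
    intro s hs
    obtain ⟨m, hm⟩ := Option.isSome_iff_exists.mp (hsome s ((hmemL s).mp hs))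
    obtain ⟨hsrc, hub, -⟩ := pvBest_get?_char cs PySem.Dict.empty s m hm
    rcases hsrc with hsrc | ⟨hmm, hms⟩
    · rw [PySem.Dict.get?_empty] at hsrc; cases hsrc
    · have hgd : best.getD s 0 = m := PySem.Dict.getD_of_get?_eq_some best 0 hm
      refine ⟨by rw [hgd]; exact hms, ?_, ?_⟩
      · intro x hx hsx
        rw [hgd]
        exact hub x ((pvL_perm cs).mem_iff.mp hx) hsx
      · exact ⟨m, (pvL_perm cs).mem_iff.mpr hmm, hms, by rw [hgd]⟩
  exact PySem.List.sorted_rev_eq_of_perm_of_pairwise_gt _ _ _ hperm hpair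

-- ===== VERDICT (by name: the statement is the Claim_ definition above) =====
theorem canonicalize_cards_spec : Claim_equal_canonicalize_cards := by
  intro hero board extra _dom
  unfold Spec_canonicalize_cards
  simp only [canonicalize_cards, canonicalize_cards_alt]
  by_cases hcs : hero ++ board ++ extra.getD [] = []
  · rw [if_pos hcs, if_pos hcs]
  · rw [if_neg hcs, if_neg hcs]
    rw [pvBestSorted_eq, pvCanonSuitOrder_eq]
    set cs := hero ++ board ++ extra.getD [] with hcsdef
    set sm := (PySem.List.enumerate (pvSO cs)).foldl
        (fun d (p : Int × Int) => d.insert p.2 p.1) PySem.Dict.empty with hsm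
    have hsome : ∀ c ∈ cs, ((sm.get? (pvSu c)).isSome) := by
      intro c hc
      apply pvSuitMap_isSome
      left
      rw [pvEnumerate_map_snd]
      unfold pvSO
      rw [PySem.Set.mem_ofList]
      exact List.mem_map.mpr ⟨c, (pvL_perm cs).mem_iff.mpr hc, rfl⟩
    have hh : ∀ c ∈ hero, ((sm.get? (pvSu c)).isSome) := fun c hc =>
      hsome c (List.mem_append.mpr (Or.inl (List.mem_append.mpr (Or.inl hc))))
    have hb : ∀ c ∈ board, ((sm.get? (pvSu c)).isSome) := fun c hc =>
      hsome c (List.mem_append.mpr (Or.inl (List.mem_append.mpr (Or.inr hc))))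
    have he : ∀ c ∈ extra.getD [], ((sm.get? (pvSu c)).isSome) := fun c hc =>
      hsome c (List.mem_append.mpr (Or.inr hc))
    rw [pvRemapA_eq hero sm hh]
    simp only []
    rw [pvRemapA_eq board sm hb, pvRemapA_eq (extra.getD []) sm he]
    simp [pvSu]
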